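-- pv_equiv track=rewrite | github.com/NaCN-Azure/2021-SE-stcakoverflow | python/dbUtils/mysqlPosts2.py | get_data_slice
-- ===== SOURCE A (Python) =====
-- def get_data_slice(data,interval=10000):
--     datalist=[]
--     leng=len(data)
--     alltags=list(data.keys())
--     if leng==50000:
--         alltags=alltags[30000:40000]
--         leng=10000
--     bias=0
--     if(interval==500):
--         bias=56
--     for i in range(0,leng//interval):
--         dic={}
--         tagnames=alltags[i*interval+bias:(i+1)*interval]
--         for tagname in tagnames:
--             dic[tagname] = data[tagname]
--         datalist.append(dic)
--     return datalist
-- ===== SOURCE B (Python) =====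
-- def get_data_slice(data, interval=10000):
--     alltags = list(data.keys())
--     if len(alltags) == 50000:
--         alltags = alltags[30000:40000]
--     bias = 56 if interval == 500 else 0
--     numchunks = len(alltags) // interval
--     buckets = [dict() for _ in range(numchunks)]
--     for idx, key in enumerate(alltags):
--         c = idx // interval
--         if 0 <= c < numchunks and idx % interval >= bias:
--             buckets[c][key] = data[key]
--     return buckets
-- ===== Notes on version B (the rewrite author's own statement) =====
-- stated objective: alternative
-- what changed: Replaces the nested chunk-loop with per-chunk list slicing by one linear bucketing pass over enumerate(keys) that assigns each key to chunk idx//interval (skipping idx%interval < bias), into pre-created empty dicts.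
import Mathlib
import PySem

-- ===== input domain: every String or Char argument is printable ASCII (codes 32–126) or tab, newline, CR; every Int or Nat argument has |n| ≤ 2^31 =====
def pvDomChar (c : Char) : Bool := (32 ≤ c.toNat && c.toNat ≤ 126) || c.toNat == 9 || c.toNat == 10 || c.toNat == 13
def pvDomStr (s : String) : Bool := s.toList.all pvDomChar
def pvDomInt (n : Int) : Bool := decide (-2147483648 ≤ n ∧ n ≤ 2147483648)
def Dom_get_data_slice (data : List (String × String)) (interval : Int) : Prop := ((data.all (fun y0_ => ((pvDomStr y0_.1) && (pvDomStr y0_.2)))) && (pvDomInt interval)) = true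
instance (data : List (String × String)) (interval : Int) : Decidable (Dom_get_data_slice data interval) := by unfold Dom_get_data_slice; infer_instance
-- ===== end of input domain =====

-- B replaces A's nested chunk loop (one list slice per chunk) by a single bucketing pass over
-- enumerate(keys) into pre-created empty dicts (objective: alternative decomposition, same cost).

-- ===== PORT A =====
-- 'data[tagname]' is looked up with getD; the default is never reached since every tagname is a key of data.
def get_data_slice (data : List (String × String)) (interval : Int) : List (List (String × String)) :=
  let leng : Int := (data.length : Int)
  let alltags : List String := data.map Prod.fst
  let alltags : List String :=
    if leng = 50000 then PySem.List.slice alltags (some 30000) (some 40000) else alltags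
  let leng : Int := if leng = 50000 then 10000 else leng
  let bias : Int := if interval = 500 then 56 else 0
  (PySem.List.pyRange 0 (PySem.Int.floordiv leng interval) 1).foldl
    (fun datalist i =>
      let tagnames := PySem.List.slice alltags (some (i * interval + bias)) (some ((i + 1) * interval))
      let dic : PySem.Dict String String := tagnames.foldl
        (fun dic tagname => dic.insert tagname ((PySem.Dict.mk data).getD tagname "")) PySem.Dict.empty
      datalist ++ [dic.items]) []

-- ===== PORT B =====
def get_data_slice_alt (data : List (String × String)) (interval : Int) : List (List (String × String)) :=
  let alltags : List String := data.map Prod.fst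
  let alltags : List String :=
    if (alltags.length : Int) = 50000 then PySem.List.slice alltags (some 30000) (some 40000) else alltags
  let bias : Int := if interval = 500 then 56 else 0
  let numchunks : Int := PySem.Int.floordiv (alltags.length : Int) interval
  let buckets : List (PySem.Dict String String) := List.replicate numchunks.toNat PySem.Dict.empty
  let buckets := (PySem.List.enumerate alltags 0).foldl
    (fun bs p =>
      let c : Int := PySem.Int.floordiv p.1 interval
      if 0 ≤ c ∧ c < numchunks ∧ bias ≤ PySem.Int.mod p.1 interval then
        bs.modify c.toNat (fun d => d.insert p.2 ((PySem.Dict.mk data).getD p.2 ""))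
      else bs) buckets
  buckets.map (·.items)

-- ===== PRECONDITION & SPEC =====
-- Pre_ excludes exactly interval = 0, where Python's 'leng//interval' raises ZeroDivisionError (B raises there too).
def Pre_get_data_slice (data : List (String × String)) (interval : Int) : Prop := interval ≠ 0
instance (data : List (String × String)) (interval : Int) : Decidable (Pre_get_data_slice data interval) := by unfold Pre_get_data_slice; infer_instance
def pvWitness_get_data_slice : (List (String × String)) × Int := ([("a", "1"), ("b", "2"), ("c", "3")], 2)
def Spec_get_data_slice (data : List (String × String)) (interval : Int) (out : List (List (String × String))) : Prop := out = get_data_slice_alt data interval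
instance (data : List (String × String)) (interval : Int) (out : List (List (String × String))) : Decidable (Spec_get_data_slice data interval out) := by unfold Spec_get_data_slice; infer_instance

-- ===== CLAIM (what is proved, stated in full; the proofs are below) =====
def Claim_equal_get_data_slice : Prop := ∀ (data : List (String × String)) (interval : Int), Dom_get_data_slice data interval → Pre_get_data_slice data interval → Spec_get_data_slice data interval (get_data_slice data interval)

-- ===== LEMMAS AND PROOFS =====

-- the dict A builds for chunk c
def pvChunk (tags : List String) (I binc : Int) (F : String → String) (c : Int) : PySem.Dict String String :=
  (PySem.List.slice tags (some (c * I + binc)) (some ((c + 1) * I))).foldl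
    (fun d t => d.insert t (F t)) PySem.Dict.empty

-- floor division of a nonnegative number by a negative number is nonpositive
lemma pv_floordiv_nonpos (a b : Int) (ha : 0 ≤ a) (hb : b < 0) : PySem.Int.floordiv a b ≤ 0 := by
  rcases le_or_gt (PySem.Int.floordiv a b) 0 with h | h
  · exact h
  · exfalso
    have h1 := PySem.Int.floordiv_mul_add_mod a b
    have h2 := (PySem.Int.mod_neg_bounds (a := a) (b := b) hb).2
    nlinarith [mul_pos h (neg_pos.mpr hb)]

-- elementwise view of B's conditional-modify bucketing fold
lemma pv_step_getElem? (I n binc : Int) (F : String → String) (l : List (Int × String))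
    (bs : List (PySem.Dict String String)) (j : Nat) :
    (l.foldl
      (fun bs p =>
        if 0 ≤ PySem.Int.floordiv p.1 I ∧ PySem.Int.floordiv p.1 I < n ∧ binc ≤ PySem.Int.mod p.1 I then
          bs.modify (PySem.Int.floordiv p.1 I).toNat (fun d => d.insert p.2 (F p.2))
        else bs) bs)[j]? =
      Option.map
        (fun a =>
          (l.filter (fun p =>
              decide (0 ≤ PySem.Int.floordiv p.1 I ∧ PySem.Int.floordiv p.1 I < n ∧ binc ≤ PySem.Int.mod p.1 I)
                && ((PySem.Int.floordiv p.1 I).toNat == j))).foldl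
            (fun a p => a.insert p.2 (F p.2)) a)
        bs[j]? := by
  induction l generalizing bs with
  | nil => cases h : bs[j]? <;> simp [h]
  | cons p l ih =>
    simp only [List.foldl_cons, List.filter_cons]
    by_cases hP : 0 ≤ PySem.Int.floordiv p.1 I ∧ PySem.Int.floordiv p.1 I < n ∧ binc ≤ PySem.Int.mod p.1 I
    · by_cases hj : (PySem.Int.floordiv p.1 I).toNat = j
      · rw [if_pos hP, ih]
        subst hj
        rw [List.getElem?_modify_eq]
        cases h : bs[(PySem.Int.floordiv p.1 I).toNat]? <;> simp only [h, Option.map_some, Option.map_none] <;> simp [hP]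
      · rw [if_pos hP, ih, List.getElem?_modify_ne _ _ hj]
        simp [hP, hj]
    · rw [if_neg hP, ih]
      simp [hP]

-- the members of 'enumerate xs 0' whose index lies in [lo, hi) are exactly 'enumerate' of that segment
lemma pv_filter_enumerate_interval {α : Type} (xs : List α) (lo hi : Int)
    (h0 : 0 ≤ lo) (hlo : lo ≤ hi) (hhi : hi ≤ (xs.length : Int)) :
    ((PySem.List.enumerate xs 0).filter (fun p => decide (lo ≤ p.1 ∧ p.1 < hi))) =
      PySem.List.enumerate ((xs.drop lo.toNat).take (hi.toNat - lo.toNat)) lo := by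
  obtain ⟨lo, rfl⟩ : ∃ l : Nat, lo = (l : Int) := ⟨lo.toNat, (Int.toNat_of_nonneg h0).symm⟩
  obtain ⟨hi, rfl⟩ : ∃ h : Nat, hi = (h : Int) := ⟨hi.toNat, (Int.toNat_of_nonneg (le_trans h0 hlo)).symm⟩
  have hlo' : lo ≤ hi := by exact_mod_cast hlo
  have hhi' : hi ≤ xs.length := by exact_mod_cast hhi
  simp only [Int.toNat_natCast]
  have h0' : xs.drop hi = (xs.drop lo).drop (hi - lo) := by
    rw [List.drop_drop]; congr 1; omega
  have hsplit : xs = xs.take lo ++ ((xs.drop lo).take (hi - lo) ++ xs.drop hi) := by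
    rw [h0', List.take_append_drop, List.take_append_drop]
  conv_lhs => rw [hsplit]
  rw [PySem.List.enumerate_append, PySem.List.enumerate_append, List.filter_append, List.filter_append]
  have hltake : (xs.take lo).length = lo := by rw [List.length_take]; omega
  have hlmid : ((xs.drop lo).take (hi - lo)).length = hi - lo := by
    rw [List.length_take, List.length_drop]; omega
  have h1 : (PySem.List.enumerate (xs.take lo) 0).filter (fun p => decide ((lo : Int) ≤ p.1 ∧ p.1 < (hi : Int))) = [] := by
    rw [List.filter_eq_nil_iff]
    intro p hp
    obtain ⟨k, hk, rfl⟩ := (PySem.List.mem_enumerate_iff _ _ _).mp hp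
    rw [hltake] at hk
    simp only [decide_eq_true_eq, not_and]
    intro h; exfalso; omega
  have h2 : (PySem.List.enumerate ((xs.drop lo).take (hi - lo)) (0 + (xs.take lo).length)).filter (fun p => decide ((lo : Int) ≤ p.1 ∧ p.1 < (hi : Int))) = PySem.List.enumerate ((xs.drop lo).take (hi - lo)) (lo : Int) := by
    rw [hltake, Int.zero_add]
    apply List.filter_eq_self.mpr
    intro p hp
    obtain ⟨k, hk, rfl⟩ := (PySem.List.mem_enumerate_iff _ _ _).mp hp
    rw [hlmid] at hk
    simp only [decide_eq_true_eq]
    omega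
  have h3 : (PySem.List.enumerate (xs.drop hi) ((0 + (xs.take lo).length) + ((xs.drop lo).take (hi - lo)).length)).filter (fun p => decide ((lo : Int) ≤ p.1 ∧ p.1 < (hi : Int))) = [] := by
    rw [List.filter_eq_nil_iff]
    intro p hp
    obtain ⟨k, hk, rfl⟩ := (PySem.List.mem_enumerate_iff _ _ _).mp hp
    simp only [hltake, hlmid, decide_eq_true_eq, not_and]
    intro h; omega
  rw [h1, h2, h3, List.nil_append, List.append_nil]

-- folding a function of the value only over 'enumerate xs s' is folding over xs
lemma pv_foldl_enumerate_snd {α γ : Type} (xs : List α) (s : Int) (g : α → γ → γ) (a0 : γ) :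
    (PySem.List.enumerate xs s).foldl (fun a p => g p.2 a) a0 = xs.foldl (fun a x => g x a) a0 := by
  conv_rhs => rw [← PySem.List.map_snd_enumerate xs s]
  rw [List.foldl_map]

-- the bucketing fold of B produces exactly A's chunk dicts, in chunk order
lemma pv_buckets_eq (tags : List String) (I binc : Int) (F : String → String)
    (hI : I ≠ 0) (hb0 : 0 ≤ binc) (hbI : binc ≤ I ∨ binc = 0) :
    ((PySem.List.enumerate tags 0).foldl
      (fun bs p =>
        if 0 ≤ PySem.Int.floordiv p.1 I ∧ PySem.Int.floordiv p.1 I < PySem.Int.floordiv (tags.length : Int) I ∧ binc ≤ PySem.Int.mod p.1 I then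
          bs.modify (PySem.Int.floordiv p.1 I).toNat (fun d => d.insert p.2 (F p.2))
        else bs)
      (List.replicate (PySem.Int.floordiv (tags.length : Int) I).toNat PySem.Dict.empty)) =
    (PySem.List.pyRange 0 (PySem.Int.floordiv (tags.length : Int) I) 1).map (pvChunk tags I binc F) := by
  set n : Int := PySem.Int.floordiv (tags.length : Int) I with hn
  apply List.ext_getElem?
  intro j
  rw [pv_step_getElem?]
  rw [List.getElem?_map]
  by_cases hj : j < n.toNat
  · -- in range: the j-th bucket is A's j-th chunk
    have hnpos : 0 < n := by omega
    have hIpos : 0 < I := by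
      rcases lt_trichotomy I 0 with h | h | h
      · exfalso
        have := pv_floordiv_nonpos (tags.length : Int) I (by positivity) h
        omega
      · exact absurd h hI
      · exact h
    have hble : binc ≤ I := hbI.elim id (fun h => by omega)
    have hjn : (j : Int) < n := by omega
    have hdl := PySem.Int.floordiv_mul_add_mod (tags.length : Int) I
    have hml := PySem.Int.mod_nonneg (a := (tags.length : Int)) hIpos
    have hnI : n * I ≤ (tags.length : Int) := by rw [hn] at *; linarith
    have hhi : ((j : Int) + 1) * I ≤ (tags.length : Int) := by
      have h1 : ((j : Int) + 1) ≤ n := by omega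
      have := mul_le_mul_of_nonneg_right h1 hIpos.le
      linarith
    -- the range element
    have hrange : (PySem.List.pyRange 0 n 1)[j]? = some ((j : Int)) := by
      rw [PySem.List.pyRange_one]
      rw [List.getElem?_map]
      rw [List.getElem?_range (by simpa using hj)]
      simp
    rw [hrange]
    have hrep : (List.replicate n.toNat (PySem.Dict.empty : PySem.Dict String String))[j]? = some PySem.Dict.empty := by
      rw [List.getElem?_replicate]
      simp [hj]
    rw [hrep]
    simp only [Option.map_some]
    congr 1
    -- rewrite the filter predicate to an index interval
    have hfc : (PySem.List.enumerate tags 0).filter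
        (fun p => decide (0 ≤ PySem.Int.floordiv p.1 I ∧ PySem.Int.floordiv p.1 I < n ∧ binc ≤ PySem.Int.mod p.1 I)
          && ((PySem.Int.floordiv p.1 I).toNat == j)) =
        (PySem.List.enumerate tags 0).filter
          (fun p => decide ((j : Int) * I + binc ≤ p.1 ∧ p.1 < ((j : Int) + 1) * I)) := by
      apply List.filter_congr
      intro p hp
      obtain ⟨k, hk, rfl⟩ := (PySem.List.mem_enumerate_iff _ _ _).mp hp
      rw [Bool.eq_iff_iff]
      simp only [Bool.and_eq_true, decide_eq_true_eq, beq_iff_eq]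
      set t : Int := (0 : Int) + (k : Int) with ht
      have hdm := PySem.Int.floordiv_mul_add_mod t I
      have hm0 := PySem.Int.mod_nonneg (a := t) hIpos
      have hmlt := PySem.Int.mod_lt (a := t) hIpos
      have hexp : ((j : Int) + 1) * I = (j : Int) * I + I := by ring
      constructor
      · rintro ⟨⟨hc0, hcn, hcb⟩, hcj⟩
        have hc : PySem.Int.floordiv t I = (j : Int) := by omega
        rw [hc] at hdm
        constructor <;> linarith
      · rintro ⟨hlo, hhi'⟩
        have hc : PySem.Int.floordiv t I = (j : Int) := by
          rw [PySem.Int.floordiv_eq_iff_of_pos hIpos]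
          constructor <;> linarith
        rw [hc] at hdm ⊢
        refine ⟨⟨by positivity, hjn, by linarith⟩, by omega⟩
    rw [hfc]
    have hjI : (0 : Int) ≤ (j : Int) * I := mul_nonneg (Int.natCast_nonneg j) hIpos.le
    have hexp : ((j : Int) + 1) * I = (j : Int) * I + I := by ring
    have hlo0 : (0 : Int) ≤ (j : Int) * I + binc := by linarith
    have hhi0 : (0 : Int) ≤ ((j : Int) + 1) * I := by linarith
    rw [pv_filter_enumerate_interval tags ((j : Int) * I + binc) (((j : Int) + 1) * I)
      hlo0 (by linarith) hhi]
    exact (pv_foldl_enumerate_snd _ _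
      (fun (x : String) (a : PySem.Dict String String) => a.insert x (F x)) PySem.Dict.empty).trans
      (by rw [pvChunk, PySem.List.slice_toNat _ hlo0 hhi0])
  · -- out of range on both sides
    have h1 : (List.replicate n.toNat (PySem.Dict.empty : PySem.Dict String String))[j]? = none := by
      rw [List.getElem?_eq_none]
      simpa using hj
    have h2 : (PySem.List.pyRange 0 n 1)[j]? = none := by
      rw [List.getElem?_eq_none]
      rw [PySem.List.length_pyRange_one]
      omega
    rw [h1, h2]
    simp

-- the two programs, generalized over the tag list, the bias and the value lookup
lemma pv_core (tags : List String) (I binc : Int) (F : String → String)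
    (hI : I ≠ 0) (hb0 : 0 ≤ binc) (hbI : binc ≤ I ∨ binc = 0)
    (leng : Int) (hleng : leng = (tags.length : Int)) :
    (PySem.List.pyRange 0 (PySem.Int.floordiv leng I) 1).foldl
      (fun datalist i =>
        datalist ++ [((PySem.List.slice tags (some (i * I + binc)) (some ((i + 1) * I))).foldl
          (fun dic tagname => dic.insert tagname (F tagname)) PySem.Dict.empty).items]) [] =
    ((PySem.List.enumerate tags 0).foldl
      (fun bs p =>
        if 0 ≤ PySem.Int.floordiv p.1 I ∧ PySem.Int.floordiv p.1 I < PySem.Int.floordiv (tags.length : Int) I ∧ binc ≤ PySem.Int.mod p.1 I then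
          bs.modify (PySem.Int.floordiv p.1 I).toNat (fun d => d.insert p.2 (F p.2))
        else bs)
      (List.replicate (PySem.Int.floordiv (tags.length : Int) I).toNat PySem.Dict.empty)).map (·.items) := by
  subst hleng
  rw [pv_buckets_eq tags I binc F hI hb0 hbI]
  rw [PySem.List.foldl_append_singleton_eq_map, List.map_map, List.nil_append]
  rfl

-- ===== VERDICT (by name: the statement is the Claim_ definition above) =====
theorem get_data_slice_spec : Claim_equal_get_data_slice := by
  intro data interval _hdom hpre
  unfold Pre_get_data_slice at hpre
  unfold Spec_get_data_slice
  have hb0 : (0 : Int) ≤ (if interval = 500 then 56 else 0) := by split <;> norm_num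
  have hbI : (if interval = 500 then (56 : Int) else 0) ≤ interval ∨ (if interval = 500 then (56 : Int) else 0) = 0 := by
    split
    · left; omega
    · right; rfl
  simp only [get_data_slice, get_data_slice_alt, List.length_map]
  by_cases h50 : ((data.length : Int)) = 50000
  · simp only [if_pos h50]
    have hlen : ((PySem.List.slice (data.map Prod.fst) (some 30000) (some 40000)).length : Int) = 10000 := by
      rw [PySem.List.slice_toNat _ (by norm_num) (by norm_num)]
      have hd : data.length = 50000 := by exact_mod_cast h50
      norm_num [List.length_take, List.length_drop, hd]
    rw [← hlen]
    exact pv_core _ interval _ (fun t => (PySem.Dict.mk data).getD t "") hpre hb0 hbI _ rfl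
  · simp only [if_neg h50]
    exact pv_core _ interval _ (fun t => (PySem.Dict.mk data).getD t "") hpre hb0 hbI _ (by simp)
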